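-- pv_equiv track=rewrite | github.com/rreube3/CSE6250 | Create_External_Features.py | fpp_count
-- ===== SOURCE A (Python) =====
-- def clean_data(post):
--     # create cleaned dataset to be used for generating scores
--     lower_post = post.lower()
--     # remove punctuation from post
--     exclude = set(",.:;'\"-?!/")
--     exclude_post = "".join([(char if char not in exclude else " ") for char in lower_post])
--     # ensure only lowercase letters and whitespace are in the final post
--     whitelist = set('abcdefghijklmnopqrstuvwxyz ')
--     filter_post = ''.join(filter(whitelist.__contains__, exclude_post))
--     return filter_post
--
-- def fpp_count(post):
--     cleaned_data = clean_data(post)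
--     # create a list of first person and other (secondary/tertiary) pronouns
--     fpp = ["i", "me", "my", "mine", "we", "us", "our", "ours"]
--     # calculate count of first person pronouns in the post
--     first = 0
--     for word in cleaned_data.split():
--         if word in fpp:
--             first += 1
--     return first
-- ===== SOURCE B (Python) =====
-- def clean_data(post):
--     # create cleaned dataset to be used for generating scores
--     lower_post = post.lower()
--     # remove punctuation from post
--     exclude = set(",.:;'\"-?!/")
--     exclude_post = "".join([(char if char not in exclude else " ") for char in lower_post])
--     # ensure only lowercase letters and whitespace are in the final post
--     whitelist = set('abcdefghijklmnopqrstuvwxyz ')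
--     filter_post = ''.join(filter(whitelist.__contains__, exclude_post))
--     return filter_post
--
-- def fpp_count(post):
--     # build a frequency table of the cleaned words, then query the 8 pronouns
--     counts = {}
--     for word in clean_data(post).split():
--         counts[word] = counts.get(word, 0) + 1
--     return sum(counts.get(p, 0) for p in ["i", "me", "my", "mine", "we", "us", "our", "ours"])
-- ===== Notes on version B (the rewrite author's own statement) =====
-- stated objective: alternative
-- what changed: Replaces the per-word membership-test counting loop with a build-a-frequency-table pass over the cleaned words followed by a separate query loop summing the table entries for the 8 pronouns.
import Mathlib
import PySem

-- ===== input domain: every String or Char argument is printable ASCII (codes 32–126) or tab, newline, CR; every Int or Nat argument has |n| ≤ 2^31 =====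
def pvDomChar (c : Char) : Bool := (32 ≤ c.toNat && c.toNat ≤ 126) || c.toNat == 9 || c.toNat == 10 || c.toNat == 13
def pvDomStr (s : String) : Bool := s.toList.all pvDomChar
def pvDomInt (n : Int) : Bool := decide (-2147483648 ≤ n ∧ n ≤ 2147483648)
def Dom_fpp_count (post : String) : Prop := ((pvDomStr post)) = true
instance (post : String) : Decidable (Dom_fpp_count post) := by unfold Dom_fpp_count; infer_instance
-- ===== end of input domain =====

-- B replaces the per-word membership-test loop by a word-frequency table queried for the 8 pronouns (alternative decomposition, same cost).

-- ===== PORT A =====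
def clean_data (post : String) : String :=
  let lower_post := PySem.Str.lower post
  let exclude : PySem.Set Char := PySem.Set.ofList ",.:;'\"-?!/".toList
  -- "".join of the per-char list comprehension: exact as String.mk of the mapped char list
  let exclude_post := String.ofList (lower_post.toList.map
      (fun char => if !(PySem.Set.contains exclude char) then char else ' '))
  let whitelist : PySem.Set Char := PySem.Set.ofList "abcdefghijklmnopqrstuvwxyz ".toList
  -- ''.join(filter(whitelist.__contains__, …)): exact as String.mk of the filtered char list
  String.ofList (exclude_post.toList.filter (fun c => PySem.Set.contains whitelist c))

def fpp_count (post : String) : Int :=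
  let cleaned_data := clean_data post
  let fpp : List String := ["i", "me", "my", "mine", "we", "us", "our", "ours"]
  (PySem.Str.split₀ cleaned_data).foldl
    (fun first word => if fpp.contains word then first + 1 else first) 0

-- ===== PORT B =====
def fpp_count_alt (post : String) : Int :=
  let counts : PySem.Dict String Int :=
    (PySem.Str.split₀ (clean_data post)).foldl
      (fun d word => d.insert word (d.getD word 0 + 1)) PySem.Dict.empty
  ((["i", "me", "my", "mine", "we", "us", "our", "ours"] : List String).map
      (fun p => counts.getD p 0)).sum

-- ===== PRECONDITION & SPEC =====
def Spec_fpp_count (post : String) (out : Int) : Prop := out = fpp_count_alt post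
instance (post : String) (out : Int) : Decidable (Spec_fpp_count post out) := by unfold Spec_fpp_count; infer_instance

-- ===== CLAIM (what is proved, stated in full; the proofs are below) =====
def Claim_equal_fpp_count : Prop := ∀ (post : String), Dom_fpp_count post → Spec_fpp_count post (fpp_count post)

-- ===== LEMMAS AND PROOFS =====

-- sum over a duplicate-free list of the indicator 'p = w' is the membership indicator
theorem pv_sum_indicator (l : List String) (w : String) (h : l.Nodup) :
    (l.map (fun p => if w = p then (1 : Int) else 0)).sum
      = if l.contains w then 1 else 0 := by
  induction l with
  | nil => simp
  | cons a l ih =>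
    simp only [List.map_cons, List.sum_cons, List.contains_cons]
    rcases List.nodup_cons.mp h with ⟨ha, hl⟩
    by_cases hw : w = a
    · subst hw
      simp [ih hl, ha]
    · simp [hw, ih hl]

-- counting words that lie in a duplicate-free list equals summing the per-element counts
theorem pv_countP_eq_sum (fpp ws : List String) (h : fpp.Nodup) :
    ((ws.countP (fun w => fpp.contains w) : Nat) : Int)
      = (fpp.map (fun p => ((ws.count p : Nat) : Int))).sum := by
  induction ws with
  | nil => simp
  | cons w ws ih =>
    have hcnt : ∀ p, (((w :: ws).count p : Nat) : Int)
        = ((ws.count p : Nat) : Int) + (if w = p then 1 else 0) := by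
      intro p
      by_cases hp : w = p
      · subst hp; simp
      · simp [hp]
    rw [List.countP_cons]
    simp only [hcnt]
    rw [List.sum_map_add, ← ih, pv_sum_indicator fpp w h]
    by_cases hw : fpp.contains w
    · simp only [hw, if_true]; push_cast; ring
    · simp

-- ===== VERDICT (by name: the statement is the Claim_ definition above) =====
theorem fpp_count_spec : Claim_equal_fpp_count := by
  intro post _
  show fpp_count post = fpp_count_alt post
  unfold fpp_count fpp_count_alt
  simp only [PySem.List.foldl_if_add_one, PySem.Dict.getD_foldl_insert_add_one,
    PySem.Dict.getD_empty, zero_add]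
  exact pv_countP_eq_sum _ _ (by decide)
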